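-- pv_equiv track=rewrite | github.com/SeedlingsBabylab/pyclan | pyclan/checker.py | check_timestamp_audio
-- ===== SOURCE A (Python) =====
-- def check_timestamp_audio(timestamp):
--     underscore_index = timestamp.find("_")
--
--     if underscore_index != -1:
--         try:
--             for x in range(len(timestamp)):
--                 if x != underscore_index:
--                     assert(timestamp[x].isdigit())
--         except AssertionError:
--             return False
--     else:
--         try:
--             assert(underscore_index != -1)
--         except AssertionError:
--             return False
--
--     return True
-- ===== SOURCE B (Python) =====
-- def check_timestamp_audio(timestamp):
--     digits = [c for c in timestamp if c != "_"]
--     return len(digits) == len(timestamp) - 1 and all(c.isdigit() for c in digits)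
-- ===== Notes on version B (the rewrite author's own statement) =====
-- stated objective: simpler
-- what changed: Replaces the find()/index-skip loop and try/except-assert control flow by one filter pass: keep the non-underscore characters, require that exactly one character was dropped (so there is exactly one underscore) and that all kept characters are digits.
import Mathlib
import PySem

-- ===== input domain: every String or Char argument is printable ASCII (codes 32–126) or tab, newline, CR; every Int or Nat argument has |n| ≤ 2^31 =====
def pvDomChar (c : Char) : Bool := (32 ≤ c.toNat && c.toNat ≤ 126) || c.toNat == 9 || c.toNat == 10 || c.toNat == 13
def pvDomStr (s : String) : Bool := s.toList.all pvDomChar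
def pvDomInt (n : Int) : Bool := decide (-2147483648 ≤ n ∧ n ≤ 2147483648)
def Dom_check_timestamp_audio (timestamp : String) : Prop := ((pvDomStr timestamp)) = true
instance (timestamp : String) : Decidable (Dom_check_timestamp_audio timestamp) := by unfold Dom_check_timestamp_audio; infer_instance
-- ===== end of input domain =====

-- B replaces A's find()/index-skip loop with try/except-assert by one filter pass
-- (keep non-underscore chars, require exactly one char dropped and all kept chars digits); objective: simpler.


-- ===== PORT A =====
-- the for/assert/except loop returns False iff some checked position fails, i.e. it is `all`;
-- timestamp[x] with x ∈ range(len) is always in range, ported as pyGetD (default never read)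
def check_timestamp_audio (timestamp : String) : Bool :=
  let underscore_index := PySem.Str.find timestamp "_"
  if underscore_index ≠ -1 then
    (PySem.List.pyRange 0 (PySem.Str.len timestamp) 1).all (fun x =>
      if x ≠ underscore_index then
        PySem.Chars.isdigit (PySem.List.pyGetD timestamp.toList x ' ')
      else true)
  else
    false

-- ===== PORT B =====
def check_timestamp_audio_alt (timestamp : String) : Bool :=
  let digits := timestamp.toList.filter (fun c => c != '_')
  ((PySem.List.len digits == PySem.Str.len timestamp - 1)) &&
  digits.all PySem.Chars.isdigit

-- ===== PRECONDITION & SPEC =====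
def Spec_check_timestamp_audio (timestamp : String) (out : Bool) : Prop := out = check_timestamp_audio_alt timestamp
instance (timestamp : String) (out : Bool) : Decidable (Spec_check_timestamp_audio timestamp out) := by unfold Spec_check_timestamp_audio; infer_instance

-- ===== CLAIM (what is proved, stated in full; the proofs are below) =====
def Claim_equal_check_timestamp_audio : Prop := ∀ (timestamp : String), Dom_check_timestamp_audio timestamp → Spec_check_timestamp_audio timestamp (check_timestamp_audio timestamp)

-- ===== LEMMAS AND PROOFS =====

-- two distinct positions holding '_' force count ≥ 2
theorem two_le_count_of_two_pos (cs : List Char) (i j : Nat) (hi : i < cs.length) (hj : j < cs.length)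
    (hne : i ≠ j) (h1 : cs[i] = '_') (h2 : cs[j] = '_') : 2 ≤ cs.count '_' := by
  rw [← List.duplicate_iff_two_le_count, List.duplicate_iff_exists_distinct_get]
  rcases Nat.lt_or_ge i j with h | h
  · exact ⟨⟨i, hi⟩, ⟨j, hj⟩, h, by simpa using h1.symm, by simpa using h2.symm⟩
  · exact ⟨⟨j, hj⟩, ⟨i, hi⟩, Nat.lt_of_le_of_ne h (Ne.symm hne), by simpa using h2.symm, by simpa using h1.symm⟩

theorem count_eq_one_of (cs : List Char) (n : Nat) (hn : n < cs.length) (h1 : cs[n] = '_')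
    (h2 : ∀ i (hi : i < cs.length), i ≠ n → cs[i] ≠ '_') : cs.count '_' = 1 := by
  have hmem : '_' ∈ cs := h1 ▸ List.getElem_mem hn
  have hle : cs.count '_' ≤ 1 := by
    by_contra h
    have hdup : List.Duplicate '_' cs := List.duplicate_iff_two_le_count.mpr (by omega : 2 ≤ cs.count '_')
    rw [List.duplicate_iff_exists_distinct_get] at hdup
    obtain ⟨p, q, hpq, hp, hq⟩ := hdup
    rcases eq_or_ne p.1 n with h' | h'
    · exact h2 q.1 q.2 (by omega) (by simpa using hq.symm)
    · exact h2 p.1 p.2 h' (by simpa using hp.symm)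
  have := List.count_pos_iff.mpr hmem
  omega

theorem ne_underscore_of_count_one (cs : List Char) (n : Nat) (hn : n < cs.length) (h1 : cs[n] = '_')
    (hc : cs.count '_' = 1) (i : Nat) (hi : i < cs.length) (hne : i ≠ n) : cs[i] ≠ '_' := by
  intro h
  have := two_le_count_of_two_pos cs i n hi hn hne h h1
  omega

theorem check_timestamp_audio_eq_alt (s : String) :
    check_timestamp_audio s = check_timestamp_audio_alt s := by
  have hu : ("_" : String).toList = ['_'] := rfl
  unfold check_timestamp_audio check_timestamp_audio_alt
  simp only [PySem.Str.find_eq, hu, PySem.Str.len_eq, PySem.List.len_eq]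
  rw [Bool.eq_iff_iff]
  set cs := s.toList with hcs
  set k := PySem.Chars.find cs ['_'] with hk
  by_cases hneg : k = -1
  · -- no underscore: A takes the else branch (False); B's length test fails
    have hni : ¬ ['_'] <:+: cs := (PySem.Chars.find_eq_neg_one_iff cs ['_']).mp hneg
    rw [List.singleton_infix_iff] at hni
    have hfil : cs.filter (fun c => c != '_') = cs :=
      List.filter_eq_self.mpr (fun c hc => by simp; rintro rfl; exact hni hc)
    simp [hneg, hfil]
    omega
  · have hneg' : (k ≠ -1) := hneg
    have h0 : 0 ≤ k := by have := PySem.Chars.neg_one_le_find cs ['_']; omega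
    obtain ⟨hpre, hmin⟩ := PySem.Chars.find_spec (s := cs) (sub := ['_']) h0
    set n := k.toNat with hn
    obtain ⟨t, ht⟩ := hpre
    have hlen : n < cs.length := by
      have : cs.drop n ≠ [] := by rw [← ht]; simp
      rw [ne_eq, List.drop_eq_nil_iff] at this; omega
    have hnth : cs[n] = '_' := by
      have : (cs.drop n)[0]'(by rw [← ht]; simp) = '_' := by simp [← ht]
      simpa [List.getElem_drop] using this
    have hkn : k = (n : Int) := by omega
    rw [if_pos hneg']
    -- A's loop says: every position other than n holds a digit
    have hA : ((PySem.List.pyRange 0 (cs.length : Int) 1).all (fun x =>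
        if x ≠ k then PySem.Chars.isdigit (PySem.List.pyGetD cs x ' ') else true) = true)
        ↔ (∀ i, (hi : i < cs.length) → i ≠ n → PySem.Chars.isdigit cs[i] = true) := by
      rw [List.all_eq_true]
      constructor
      · intro h i hi hne
        have hx := h (i : Int) (by rw [PySem.List.mem_pyRange_one]; omega)
        rw [if_pos (by omega : (i : Int) ≠ k)] at hx
        rwa [PySem.List.pyGetD_natCast, List.getD_eq_getElem _ _ hi] at hx
      · intro h x hx
        rw [PySem.List.mem_pyRange_one] at hx
        by_cases hxk : x = k
        · simp [hxk]
        · rw [if_pos hxk]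
          have hxi : x = ((x.toNat : Nat) : Int) := by omega
          rw [hxi, PySem.List.pyGetD_natCast, List.getD_eq_getElem _ _ (by omega)]
          exact h x.toNat (by omega) (by omega)
    rw [hA]
    -- B's length test says: exactly one '_' in cs
    have hcount : (cs.filter (fun c => c != '_')).length = cs.length - cs.count '_' := by
      have h1 : cs.countP (fun c => c != '_') + cs.count '_' = cs.length := by
        have := (List.length_eq_countP_add_countP (p := fun c => c != '_') (l := cs)).symm
        simpa [List.count, bne] using this
      rw [← List.countP_eq_length_filter]
      omega
    have hcle := List.count_le_length (l := cs) (a := '_')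
    rw [Bool.and_eq_true]
    constructor
    · intro h
      have hone : cs.count '_' = 1 := by
        refine count_eq_one_of cs n hlen hnth (fun i hi hne hcon => ?_)
        have := h i hi hne
        rw [hcon] at this
        exact absurd this (by decide)
      constructor
      · simp [hcount, hone]; omega
      · rw [List.all_eq_true]
        intro c hc
        rw [List.mem_filter] at hc
        obtain ⟨hcm, hcne⟩ := hc
        obtain ⟨i, hi, rfl⟩ := List.mem_iff_getElem.mp hcm
        rcases eq_or_ne i n with rfl | hne
        · rw [hnth] at hcne; simp at hcne
        · exact h i hi hne
    · rintro ⟨hc1, hc2⟩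
      have hone : cs.count '_' = 1 := by
        rw [beq_iff_eq, hcount] at hc1; omega
      intro i hi hne
      have hiu : cs[i] ≠ '_' := ne_underscore_of_count_one cs n hlen hnth hone i hi hne
      rw [List.all_eq_true] at hc2
      exact hc2 cs[i] (List.mem_filter.mpr ⟨List.getElem_mem hi, by simpa using hiu⟩)

-- ===== VERDICT (by name: the statement is the Claim_ definition above) =====
theorem check_timestamp_audio_spec : Claim_equal_check_timestamp_audio := by
  intro timestamp _
  unfold Spec_check_timestamp_audio
  exact check_timestamp_audio_eq_alt timestamp
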